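-- pv_equiv track=rewrite | github.com/summer2293/algorithm-study | src/dongjoo/week7/mathgiveup.py | solution
-- ===== SOURCE A (Python) =====
-- def solution(answers):
--     num_correct = [0, 0, 0]
--     pattern_one = [1, 2, 3, 4, 5]
--     pattern_three = [3, 3, 1, 1, 2, 2, 4, 4, 5, 5]
--     pattern_two = [2, 1, 2, 3, 2, 4, 2, 5]
--     q_idx = 0
--     for question in answers:
--         if question == pattern_one[q_idx % len(pattern_one)]:
--             num_correct[0] += 1
--         if question == pattern_two[q_idx % len(pattern_two)]:
--             num_correct[1] += 1
--         if question == pattern_three[q_idx % len(pattern_three)]: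
--             num_correct[2] += 1
--         q_idx += 1
--     maximum = max(num_correct)
--     answer = [i for i in range(1, 4) if num_correct[i-1] == maximum]
--     return answer
-- ===== SOURCE B (Python) =====
-- def solution(answers):
--     patterns = [[1, 2, 3, 4, 5],
--                 [2, 1, 2, 3, 2, 4, 2, 5],
--                 [3, 3, 1, 1, 2, 2, 4, 4, 5, 5]]
--     # One pass builds a frequency table over residue classes mod 40 (lcm of the
--     # pattern lengths); each score is then read off the 40-bucket table alone.
--     table = {}
--     for i, a in enumerate(answers):
--         key = (i % 40, a)
--         table[key] = table.get(key, 0) + 1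
--     scores = [sum(table.get((r, p[r % len(p)]), 0) for r in range(40))
--               for p in patterns]
--     maximum = max(scores)
--     return [i for i in range(1, 4) if scores[i - 1] == maximum]
-- ===== Notes on version B (the rewrite author's own statement) =====
-- stated objective: alternative
-- what changed: Instead of A's single loop that compares every answer against all three cyclic patterns, B makes one pass building a frequency table keyed by (index mod 40, answer) - 40 being the lcm of the pattern lengths - and then computes each pattern's score purely from the 40-bucket table, never rescanning the answers.
import Mathlib
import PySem

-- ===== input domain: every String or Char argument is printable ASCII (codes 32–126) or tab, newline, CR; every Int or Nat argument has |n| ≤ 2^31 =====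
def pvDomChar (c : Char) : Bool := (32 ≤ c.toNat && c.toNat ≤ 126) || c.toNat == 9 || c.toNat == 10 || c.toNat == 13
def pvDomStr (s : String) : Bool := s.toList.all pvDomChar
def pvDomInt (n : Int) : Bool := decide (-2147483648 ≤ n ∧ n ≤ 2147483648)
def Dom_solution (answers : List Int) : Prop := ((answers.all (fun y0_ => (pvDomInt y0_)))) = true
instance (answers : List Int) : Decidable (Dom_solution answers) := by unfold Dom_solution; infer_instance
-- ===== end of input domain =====

-- B replaces A's single loop comparing every answer against the three cyclic patterns by one
-- pass building a frequency table keyed by (index mod 40, answer) — 40 = lcm of the pattern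
-- lengths — and reads each pattern's score off the 40-bucket table alone (alternative).

-- ===== PORT A =====
def solAPatternOne : List Int := [1, 2, 3, 4, 5]
def solAPatternTwo : List Int := [2, 1, 2, 3, 2, 4, 2, 5]
def solAPatternThree : List Int := [3, 3, 1, 1, 2, 2, 4, 4, 5, 5]

-- the for-loop over answers; q_idx only ever holds 0,1,2,… so it is carried as a Nat,
-- and pattern[q_idx % len(pattern)] is always in range, so getD is exact
def solALoop : List Int → Int → Int → Int → Nat → Int × Int × Int
  | [], c1, c2, c3, _ => (c1, c2, c3)
  | q :: rest, c1, c2, c3, i =>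
    let c1' := if q = solAPatternOne.getD (i % solAPatternOne.length) 0 then c1 + 1 else c1
    let c2' := if q = solAPatternTwo.getD (i % solAPatternTwo.length) 0 then c2 + 1 else c2
    let c3' := if q = solAPatternThree.getD (i % solAPatternThree.length) 0 then c3 + 1 else c3
    solALoop rest c1' c2' c3' (i + 1)

def solution (answers : List Int) : List Int :=
  let nc := solALoop answers 0 0 0 0
  let numCorrect := [nc.1, nc.2.1, nc.2.2]
  let maximum := (PySem.List.max? numCorrect (fun x => x)).getD 0
  (PySem.List.pyRange 1 4 1).filter
    (fun i => (PySem.List.pyGet? numCorrect (i - 1)).getD 0 == maximum)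

-- ===== PORT B =====
-- table[key] = table.get(key, 0) + 1 is Dict.modify key 0 (·+1); the enumerate index is ≥ 0,
-- so i % 40 is PySem.Int.mod
def solBTable (answers : List Int) : PySem.Dict (Int × Int) Int :=
  (PySem.List.enumerate answers 0).foldl
    (fun d ia => d.modify (PySem.Int.mod ia.1 40, ia.2) 0 (· + 1)) PySem.Dict.empty

-- sum(table.get((r, p[r % len(p)]), 0) for r in range(40)); r is nonnegative and
-- r % len(p) is in range, so getD with toNat is exact
def solBScore (table : PySem.Dict (Int × Int) Int) (p : List Int) : Int :=
  ((PySem.List.pyRange 0 40 1).map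
    (fun r => table.getD (r, p.getD (PySem.Int.mod r (p.length : Int)).toNat 0) 0)).sum

def solution_alt (answers : List Int) : List Int :=
  let patterns : List (List Int) :=
    [[1, 2, 3, 4, 5], [2, 1, 2, 3, 2, 4, 2, 5], [3, 3, 1, 1, 2, 2, 4, 4, 5, 5]]
  let table := solBTable answers
  let scores := patterns.map (fun p => solBScore table p)
  let maximum := (PySem.List.max? scores (fun x => x)).getD 0
  (PySem.List.pyRange 1 4 1).filter
    (fun i => (PySem.List.pyGet? scores (i - 1)).getD 0 == maximum)

-- ===== PRECONDITION & SPEC =====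
def Spec_solution (answers : List Int) (out : List Int) : Prop := out = solution_alt answers
instance (answers : List Int) (out : List Int) : Decidable (Spec_solution answers out) := by unfold Spec_solution; infer_instance

-- ===== CLAIM (what is proved, stated in full; the proofs are below) =====
def Claim_equal_solution : Prop := ∀ (answers : List Int), Dom_solution answers → Spec_solution answers (solution answers)

-- ===== LEMMAS AND PROOFS =====

-- count of matches against pattern p starting at question index n (A's running counters)
def cntFrom (p : List Int) : Nat → List Int → Int
  | _, [] => 0
  | n, q :: r => (if q = p.getD (n % p.length) 0 then 1 else 0) + cntFrom p (n + 1) r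

theorem solALoop_eq (ans : List Int) : ∀ (c1 c2 c3 : Int) (i : Nat),
    solALoop ans c1 c2 c3 i =
      (c1 + cntFrom solAPatternOne i ans,
       c2 + cntFrom solAPatternTwo i ans,
       c3 + cntFrom solAPatternThree i ans) := by
  induction ans with
  | nil => intro c1 c2 c3 i; simp [solALoop, cntFrom]
  | cons q rest ih =>
    intro c1 c2 c3 i
    simp only [solALoop, ih, cntFrom]
    refine Prod.ext ?_ (Prod.ext ?_ ?_) <;> simp <;> split_ifs <;> ring

-- the mapped key list the table loop folds over
def keyList (answers : List Int) (n : Nat) : List (Int × Int) :=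
  (PySem.List.enumerate answers (n : Int)).map (fun ia => (PySem.Int.mod ia.1 40, ia.2))

theorem keyList_cons (q : Int) (rest : List Int) (n : Nat) :
    keyList (q :: rest) n = (((n % 40 : Nat) : Int), q) :: keyList rest (n + 1) := by
  simp only [keyList, PySem.List.enumerate_cons, List.map_cons]
  rw [show ((n : Int) + 1) = ((n + 1 : Nat) : Int) by norm_cast]
  rw [show (40 : Int) = ((40 : Nat) : Int) from rfl, PySem.Int.mod_natCast]

theorem keyList_bounds (answers : List Int) (n : Nat) :
    ∀ x ∈ keyList answers n, 0 ≤ x.1 ∧ x.1 < 40 := by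
  induction answers generalizing n with
  | nil => simp [keyList, PySem.List.enumerate_nil]
  | cons q rest ih =>
    intro x hx
    rw [keyList_cons, List.mem_cons] at hx
    rcases hx with h | h
    · subst h; constructor <;> simp <;> omega
    · exact ih (n + 1) x h

-- Σ_{r∈range(40)} count of (r, f r) in L  =  number of x ∈ L with x.2 = f x.1,
-- when every first component of L lies in [0, 40)
theorem sum_count_eq_countP (L : List (Int × Int)) (f : Int → Int)
    (hb : ∀ x ∈ L, 0 ≤ x.1 ∧ x.1 < 40) :
    ((PySem.List.pyRange 0 40 1).map (fun r => ((L.count (r, f r) : Nat) : Int))).sum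
      = ((L.countP (fun x => x.2 == f x.1) : Nat) : Int) := by
  induction L with
  | nil => simp
  | cons x L ih =>
    have hx := hb x (List.mem_cons_self ..)
    have hL : ∀ y ∈ L, 0 ≤ y.1 ∧ y.1 < 40 := fun y hy => hb y (List.mem_cons_of_mem _ hy)
    have hcnt : ∀ r : Int, (((x :: L).count (r, f r) : Nat) : Int)
        = ((L.count (r, f r) : Nat) : Int) + (if (r, f r) = x then (1 : Int) else 0) := by
      intro r
      rw [List.count_cons]
      by_cases h : x = (r, f r)
      · simp [h]
      · have h2 : ¬ (r, f r) = x := fun hh => h hh.symm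
        simp [h, h2]
    have hsplit : ((PySem.List.pyRange 0 40 1).map
          (fun r => (((x :: L).count (r, f r) : Nat) : Int))).sum
        = ((PySem.List.pyRange 0 40 1).map (fun r => ((L.count (r, f r) : Nat) : Int))).sum
          + ((PySem.List.pyRange 0 40 1).map (fun r => if (r, f r) = x then (1 : Int) else 0)).sum := by
      rw [← PySem.List.sum_map_add_int]
      exact congrArg List.sum (List.map_congr_left (fun r _ => hcnt r))
    rw [hsplit, ih hL, List.countP_cons]
    by_cases hv : x.2 = f x.1
    · -- the indicator sum is 1: split range(40) at x.1
      have hone : ((PySem.List.pyRange 0 40 1).map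
            (fun r => if (r, f r) = x then (1 : Int) else 0)).sum = 1 := by
        rw [PySem.List.pyRange_one_append 0 x.1 40 hx.1 (le_of_lt hx.2),
            PySem.List.pyRange_one_cons hx.2]
        rw [List.map_append, List.sum_append, List.map_cons, List.sum_cons]
        have h1 : ((PySem.List.pyRange 0 x.1 1).map
            (fun r => if (r, f r) = x then (1 : Int) else 0)).sum = 0 := by
          apply List.sum_eq_zero
          intro y hy
          simp only [List.mem_map] at hy
          obtain ⟨r, hr, hyv⟩ := hy
          rw [PySem.List.mem_pyRange_one] at hr
          have : (r, f r) ≠ x := by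
            intro h; rw [← h] at hr; omega
          simpa [this] using hyv.symm
        have h2 : ((PySem.List.pyRange (x.1 + 1) 40 1).map
            (fun r => if (r, f r) = x then (1 : Int) else 0)).sum = 0 := by
          apply List.sum_eq_zero
          intro y hy
          simp only [List.mem_map] at hy
          obtain ⟨r, hr, hyv⟩ := hy
          rw [PySem.List.mem_pyRange_one] at hr
          have : (r, f r) ≠ x := by
            intro h; rw [← h] at hr; omega
          simpa [this] using hyv.symm
        have hmid : ((x.1 : Int), f x.1) = x := by
          cases x; simp_all
        rw [h1, hmid]
        simp [h2]
      rw [hone]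
      simp [hv]
    · have hzero : ((PySem.List.pyRange 0 40 1).map
            (fun r => if (r, f r) = x then (1 : Int) else 0)).sum = 0 := by
        apply List.sum_eq_zero
        intro y hy
        simp only [List.mem_map] at hy
        obtain ⟨r, hr, hyv⟩ := hy
        have : (r, f r) ≠ x := by
          intro h; apply hv; rw [← h]
        simpa [this] using hyv.symm
      rw [hzero]
      simp [hv]

-- counting matches of x.2 against f (x.1 mod 40) over the key list = A's cntFrom,
-- provided the pattern length divides 40
theorem countP_keyList (p : List Int) (hd : p.length ∣ 40) (answers : List Int) :
    ∀ n : Nat,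
      ((keyList answers n).countP
          (fun x => x.2 == p.getD (PySem.Int.mod x.1 (p.length : Int)).toNat 0) : Int)
        = cntFrom p n answers := by
  induction answers with
  | nil => intro n; simp [keyList, PySem.List.enumerate_nil, cntFrom]
  | cons q rest ih =>
    intro n
    rw [keyList_cons, List.countP_cons]
    have hkey : (PySem.Int.mod (((n % 40 : Nat) : Int)) (p.length : Int)).toNat
        = n % p.length := by
      rw [PySem.Int.mod_natCast, Int.toNat_natCast]
      exact Nat.mod_mod_of_dvd n hd
    simp only [hkey, cntFrom]
    rw [← ih (n + 1)]
    by_cases h : q = p.getD (n % p.length) 0 <;> simp [h] <;> omega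

-- B's score from the table = A's running count, for a pattern of length dividing 40
theorem solBScore_eq (p : List Int) (hd : p.length ∣ 40) (answers : List Int) :
    solBScore (solBTable answers) p = cntFrom p 0 answers := by
  have hfold : solBTable answers
      = (keyList answers 0).foldl (fun d x => d.modify x 0 (· + 1)) PySem.Dict.empty := by
    unfold solBTable keyList
    rw [List.foldl_map]
    norm_num
  unfold solBScore
  rw [hfold]
  have hg : ∀ r : Int,
      ((keyList answers 0).foldl (fun d x => d.modify x 0 (· + 1)) PySem.Dict.empty).getD
          (r, p.getD (PySem.Int.mod r (p.length : Int)).toNat 0) 0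
        = (((keyList answers 0).count
            (r, p.getD (PySem.Int.mod r (p.length : Int)).toNat 0) : Nat) : Int) := by
    intro r
    rw [PySem.Dict.getD_foldl_modify_add_one, PySem.Dict.getD_empty]
    ring
  rw [List.map_congr_left (fun r _ => hg r)]
  rw [sum_count_eq_countP (keyList answers 0)
        (fun r => p.getD (PySem.Int.mod r (p.length : Int)).toNat 0)
        (keyList_bounds answers 0)]
  exact countP_keyList p hd answers 0

-- ===== VERDICT (by name: the statement is the Claim_ definition above) =====
theorem solution_spec : Claim_equal_solution := by
  intro answers _
  unfold Spec_solution solution solution_alt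
  have h1 := solBScore_eq [1, 2, 3, 4, 5] (by decide) answers
  have h2 := solBScore_eq [2, 1, 2, 3, 2, 4, 2, 5] (by decide) answers
  have h3 := solBScore_eq [3, 3, 1, 1, 2, 2, 4, 4, 5, 5] (by decide) answers
  simp only [List.map, h1, h2, h3, solALoop_eq, solAPatternOne, solAPatternTwo,
    solAPatternThree, zero_add]
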